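-- pv_equiv track=rewrite | github.com/amitkan1995/100DayOfCode-Amit | workspace/Day 8/marsexp.py | marsExploration
-- ===== SOURCE A (Python) =====
-- def marsExploration(s):
--     ak=0
--     for i in range(len(s)):
--         k=i%3
--         if k==0 and s[i]!='S':
--             ak+=1
--         if k==1 and s[i]!='O':
--             ak+=1
--         if k==2 and s[i]!='S':
--             ak+=1
--     return ak
-- ===== SOURCE B (Python) =====
-- def marsExploration(s):
--     ak = 0
--     for i in range(0, len(s), 3):
--         block = s[i:i+3]
--         ak += sum(b != e for b, e in zip(block, "SOS"))
--     return ak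
-- ===== Notes on version B (the rewrite author's own statement) =====
-- stated objective: simpler
-- what changed: Replaced the per-index i%3 dispatch with three conditional branches by iterating in blocks of three and counting each block's mismatches against the repeating S-O-S pattern via zip.
import Mathlib
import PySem

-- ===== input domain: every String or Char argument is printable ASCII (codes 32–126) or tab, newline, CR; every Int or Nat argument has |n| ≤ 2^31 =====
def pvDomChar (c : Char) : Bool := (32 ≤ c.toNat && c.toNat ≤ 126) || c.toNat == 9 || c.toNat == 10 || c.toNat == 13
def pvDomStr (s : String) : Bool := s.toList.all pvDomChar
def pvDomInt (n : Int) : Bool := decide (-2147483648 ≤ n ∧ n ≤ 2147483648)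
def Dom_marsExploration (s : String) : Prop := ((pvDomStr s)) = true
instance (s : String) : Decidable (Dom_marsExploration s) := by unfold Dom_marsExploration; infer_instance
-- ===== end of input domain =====

-- B counts mismatches block-by-block against "SOS" instead of A's per-index i%3 dispatch; same O(n) cost, simpler decomposition.


-- ===== PORT A =====
-- for i in range(len(s)): k=i%3; three sequential ifs adding 1 (index i is always in range, so getD's default is never used)
def marsExploration (s : String) : Int :=
  (List.range s.toList.length).foldl
    (fun ak i =>
      let k := i % 3
      let ak := if k = 0 ∧ s.toList.getD i ' ' ≠ 'S' then ak + 1 else ak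
      let ak := if k = 1 ∧ s.toList.getD i ' ' ≠ 'O' then ak + 1 else ak
      if k = 2 ∧ s.toList.getD i ' ' ≠ 'S' then ak + 1 else ak)
    0

-- ===== PORT B =====
-- sum(b != e for b, e in zip(block, "SOS"))
def pvBlockMis (block : List Char) : Int :=
  (block.zip ['S', 'O', 'S']).foldl (fun a p => a + if p.1 ≠ p.2 then 1 else 0) 0

-- for i in range(0, len(s), 3): block = s[i:i+3]; ak += mismatches(block) — the loop as recursion consuming 3 chars per step
def pvGoB : List Char → Int
  | [] => 0
  | a :: t => pvBlockMis ((a :: t).take 3) + pvGoB ((a :: t).drop 3)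
termination_by l => l.length
decreasing_by simp

def marsExploration_alt (s : String) : Int := pvGoB s.toList

-- ===== PRECONDITION & SPEC =====
def Spec_marsExploration (s : String) (out : Int) : Prop := out = marsExploration_alt s
instance (s : String) (out : Int) : Decidable (Spec_marsExploration s out) := by unfold Spec_marsExploration; infer_instance

-- ===== CLAIM (what is proved, stated in full; the proofs are below) =====
def Claim_equal_marsExploration : Prop := ∀ (s : String), Dom_marsExploration s → Spec_marsExploration s (marsExploration s)

-- ===== LEMMAS AND PROOFS =====

-- expected character at index i of the repeating pattern "SOS"
def pvPat (i : Nat) : Char := if i % 3 = 1 then 'O' else 'S'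

-- mismatch indicator at index i of l
def pvInd (l : List Char) (i : Nat) : Int := if l.getD i ' ' ≠ pvPat i then 1 else 0

theorem pvPat_add_three (j : Nat) : pvPat (3 + j) = pvPat j := by
  unfold pvPat
  have : (3 + j) % 3 = j % 3 := by omega
  rw [this]

theorem pvStepA_eq (l : List Char) (ak : Int) (i : Nat) :
    (let k := i % 3
     let ak := if k = 0 ∧ l.getD i ' ' ≠ 'S' then ak + 1 else ak
     let ak := if k = 1 ∧ l.getD i ' ' ≠ 'O' then ak + 1 else ak
     if k = 2 ∧ l.getD i ' ' ≠ 'S' then ak + 1 else ak) = ak + pvInd l i := by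
  have h : i % 3 = 0 ∨ i % 3 = 1 ∨ i % 3 = 2 := by omega
  rcases h with h | h | h <;>
    simp only [pvInd, pvPat, h] <;> split_ifs <;> simp_all

theorem pvA_sum (l : List Char) (n : Nat) :
    (List.range n).foldl
      (fun ak i =>
        let k := i % 3
        let ak := if k = 0 ∧ l.getD i ' ' ≠ 'S' then ak + 1 else ak
        let ak := if k = 1 ∧ l.getD i ' ' ≠ 'O' then ak + 1 else ak
        if k = 2 ∧ l.getD i ' ' ≠ 'S' then ak + 1 else ak)
      0 = ∑ i ∈ Finset.range n, pvInd l i := by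
  induction n with
  | zero => simp
  | succ n ih =>
      rw [List.range_succ, List.foldl_append, Finset.sum_range_succ, ih]
      simpa using pvStepA_eq l _ n

theorem pvGoB_sum (l : List Char) :
    pvGoB l = ∑ i ∈ Finset.range l.length, pvInd l i := by
  induction l using pvGoB.induct with
  | case1 => simp [pvGoB]
  | case2 a t ih =>
      rcases t with _ | ⟨b, t⟩
      · simp [pvGoB, pvBlockMis, pvInd, pvPat]
      rcases t with _ | ⟨c, t⟩
      · simp [pvGoB, pvBlockMis, pvInd, pvPat, Finset.sum_range_succ]
      · rw [pvGoB]
        simp only [List.take, List.drop] at ih ⊢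
        rw [ih]
        have hlen : (a :: b :: c :: t).length = 3 + t.length := by simp; omega
        rw [hlen, Finset.sum_range_add]
        have hshift : ∀ j, pvInd (a :: b :: c :: t) (3 + j) = pvInd t j := by
          intro j
          unfold pvInd
          rw [pvPat_add_three]
          have : 3 + j = j + 1 + 1 + 1 := by omega
          rw [this]
          simp
        simp only [hshift]
        simp [pvBlockMis, pvInd, pvPat, Finset.sum_range_succ]

-- ===== VERDICT (by name: the statement is the Claim_ definition above) =====
theorem marsExploration_spec : Claim_equal_marsExploration := by
  intro s _
  unfold Spec_marsExploration marsExploration marsExploration_alt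
  rw [pvA_sum, pvGoB_sum]
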